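-- pv_equiv track=rewrite | github.com/structuralbioinformatics/ModCRE | scripts/cluster_motifs.py | equal_binding_site
-- ===== SOURCE A (Python) =====
-- def equal_binding_site(motif_groups):
--
--     final_groups = []
--     # Iterate each group #
--     for group in motif_groups:
--         current_groups = {}
--         # Iterate each motif per group #
--         for motif in group:
--             # cluster motifs by binding site length #
--             bs_length = motif["binding_site_length"]
--             if not bs_length in current_groups.keys():
--                 current_groups[bs_length] = [motif]
--             else:
--                 current_groups[bs_length].append(motif)
--         for bs_length in current_groups.keys():
--             final_groups.append(current_groups[bs_length])
--
--     return final_groups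
-- ===== SOURCE B (Python) =====
-- def equal_binding_site(motif_groups):
--     final_groups = []
--     for group in motif_groups:
--         lengths = list(dict.fromkeys(m["binding_site_length"] for m in group))
--         final_groups.extend([m for m in group if m["binding_site_length"] == L]
--                             for L in lengths)
--     return final_groups
-- ===== Notes on version B (the rewrite author's own statement) =====
-- stated objective: alternative
-- what changed: Replaces A's single-pass dict-of-lists accumulation per group with computing the distinct binding_site_length values in first-appearance order and then building each output sublist by a separate filter scan of the whole group.
import Mathlib
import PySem

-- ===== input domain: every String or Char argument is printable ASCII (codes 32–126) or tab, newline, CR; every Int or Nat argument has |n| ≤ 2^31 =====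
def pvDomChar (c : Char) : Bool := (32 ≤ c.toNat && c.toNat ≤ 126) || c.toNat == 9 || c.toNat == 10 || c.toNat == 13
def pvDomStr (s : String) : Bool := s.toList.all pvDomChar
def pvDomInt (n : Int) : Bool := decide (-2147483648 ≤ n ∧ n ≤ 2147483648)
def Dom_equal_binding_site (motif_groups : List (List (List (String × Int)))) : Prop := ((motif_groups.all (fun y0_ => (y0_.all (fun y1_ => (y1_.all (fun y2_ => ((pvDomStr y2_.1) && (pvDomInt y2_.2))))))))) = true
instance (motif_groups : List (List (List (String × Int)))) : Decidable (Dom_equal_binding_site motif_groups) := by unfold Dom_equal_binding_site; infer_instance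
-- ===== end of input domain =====

-- B replaces A's single-pass dict accumulation with "distinct lengths first, then one filter
-- scan per distinct length" (objective: alternative decomposition, same results).

-- ===== PORT A =====
-- motif["binding_site_length"]: first-match association lookup; a missing key is a Python
-- KeyError, excluded by Pre_ below (the .getD 0 default is never reached under Pre_).
def pvBS (motif : List (String × Int)) : Int :=
  ((motif.find? (fun p => p.1 == "binding_site_length")).map (fun p => p.2)).getD 0

def equal_binding_site (motif_groups : List (List (List (String × Int)))) : List (List (List (String × Int))) :=
  motif_groups.foldl (fun final_groups group =>
    let current_groups : PySem.Dict Int (List (List (String × Int))) :=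
      group.foldl (fun d motif =>
        let bs := pvBS motif
        if d.contains bs = false then d.insert bs [motif]
        else d.insert bs (d.getD bs [] ++ [motif])) PySem.Dict.empty
    current_groups.keys.foldl (fun acc bs => acc ++ [current_groups.getD bs []]) final_groups) []

-- ===== PORT B =====
def equal_binding_site_alt (motif_groups : List (List (List (String × Int)))) : List (List (List (String × Int))) :=
  motif_groups.foldl (fun final_groups group =>
    let lengths := PySem.List.dedup (group.map pvBS)
    final_groups ++ lengths.map (fun L => group.filter (fun m => pvBS m == L))) []

-- ===== PRECONDITION & SPEC =====
-- Pre_: every motif dict contains the key "binding_site_length" (otherwise Python A raises KeyError).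
def Pre_equal_binding_site (motif_groups : List (List (List (String × Int)))) : Prop :=
  (motif_groups.all (fun group => group.all (fun motif =>
    motif.any (fun p => p.1 == "binding_site_length")))) = true
instance (motif_groups : List (List (List (String × Int)))) : Decidable (Pre_equal_binding_site motif_groups) := by unfold Pre_equal_binding_site; infer_instance

def pvWitness_equal_binding_site : (List (List (List (String × Int)))) :=
  [[[("binding_site_length", 2), ("id", 1)], [("binding_site_length", 3)]]]

def Spec_equal_binding_site (motif_groups : List (List (List (String × Int)))) (out : List (List (List (String × Int)))) : Prop := out = equal_binding_site_alt motif_groups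
instance (motif_groups : List (List (List (String × Int)))) (out : List (List (List (String × Int)))) : Decidable (Spec_equal_binding_site motif_groups out) := by unfold Spec_equal_binding_site; infer_instance

-- ===== CLAIM (what is proved, stated in full; the proofs are below) =====
def Claim_equal_equal_binding_site : Prop := ∀ (motif_groups : List (List (List (String × Int)))), Dom_equal_binding_site motif_groups → Pre_equal_binding_site motif_groups → Spec_equal_binding_site motif_groups (equal_binding_site motif_groups)

-- ===== LEMMAS AND PROOFS =====

-- A's accumulation step is exactly Dict.modify with append.
theorem pv_step_eq_modify :
    (fun (d : PySem.Dict Int (List (List (String × Int)))) motif =>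
      let bs := pvBS motif
      if d.contains bs = false then d.insert bs [motif]
      else d.insert bs (d.getD bs [] ++ [motif]))
    = (fun d motif => d.modify (pvBS motif) [] (· ++ [motif])) := by
  funext d motif
  by_cases h : d.contains (pvBS motif) = false
  · simp only [h, if_true]
    have h0 : d.getD (pvBS motif) [] = [] := by
      simp [PySem.Dict.getD_of_not_contains, h]
    show d.insert (pvBS motif) [motif] = d.insert (pvBS motif) (d.getD (pvBS motif) [] ++ [motif])
    rw [h0]; rfl
  · simp only [h]; rfl

-- Each group's emitted sublists: one filter scan per first-appearance length.
theorem pv_group_eq (group : List (List (String × Int)))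
    (acc : List (List (List (String × Int)))) :
    ((group.foldl (fun d motif =>
        let bs := pvBS motif
        if d.contains bs = false then d.insert bs [motif]
        else d.insert bs (d.getD bs [] ++ [motif]))
        (PySem.Dict.empty : PySem.Dict Int (List (List (String × Int))))).keys.foldl
      (fun a bs => a ++
        [(group.foldl (fun d motif =>
            let bs := pvBS motif
            if d.contains bs = false then d.insert bs [motif]
            else d.insert bs (d.getD bs [] ++ [motif]))
            (PySem.Dict.empty : PySem.Dict Int (List (List (String × Int))))).getD bs []]) acc)
    = acc ++ (PySem.List.dedup (group.map pvBS)).map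
        (fun L => group.filter (fun m => pvBS m == L)) := by
  rw [pv_step_eq_modify]
  have hkeys : (group.foldl (fun d motif => d.modify (pvBS motif) [] (· ++ [motif]))
      (PySem.Dict.empty : PySem.Dict Int (List (List (String × Int))))).keys
      = PySem.List.dedup (group.map pvBS) := by
    rw [PySem.Dict.keys_foldl_modify_key]
    simp [PySem.Set.update, PySem.Set.ofList_eq_foldl, PySem.Dict.keys, PySem.Dict.empty]
  have hfold : group.foldl (fun d motif => d.modify (pvBS motif) [] (· ++ [motif]))
      (PySem.Dict.empty : PySem.Dict Int (List (List (String × Int))))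
      = (group.map (fun m => (pvBS m, m))).foldl
          (fun d p => d.modify p.1 [] (· ++ [p.2])) PySem.Dict.empty := by
    rw [List.foldl_map]
  have hgetD : ∀ L : Int,
      (group.foldl (fun d motif => d.modify (pvBS motif) [] (· ++ [motif]))
        (PySem.Dict.empty : PySem.Dict Int (List (List (String × Int))))).getD L []
      = group.filter (fun m => pvBS m == L) := by
    intro L
    rw [hfold, PySem.Dict.getD_foldl_modify_append]
    simp [List.filter_map, Function.comp_def, List.map_map]
  simp only [PySem.List.foldl_append_singleton_eq_map, hkeys]
  congr 1
  exact List.map_congr_left (fun L _ => hgetD L)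

theorem pv_main (motif_groups : List (List (List (String × Int)))) :
    equal_binding_site motif_groups = equal_binding_site_alt motif_groups := by
  unfold equal_binding_site equal_binding_site_alt
  induction motif_groups using List.reverseRecOn with
  | nil => rfl
  | append_singleton gs g ih =>
      rw [List.foldl_append, List.foldl_append, List.foldl_cons, List.foldl_cons,
        List.foldl_nil, List.foldl_nil, ih, pv_group_eq]

-- ===== VERDICT (by name: the statement is the Claim_ definition above) =====
theorem equal_binding_site_spec : Claim_equal_equal_binding_site :=
  fun motif_groups _ _ => pv_main motif_groups
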